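-- pv_equiv track=rewrite | github.com/fellennert/riksdagen-corpus | riksdagen_corpus/segmentation.py | _detect_mp
-- ===== SOURCE A (Python) =====
-- def _detect_mp(matched_txt, names_ids):
--     person = None
--     for name, identifier in names_ids:
--         if name in matched_txt:
--             person = identifier
--
--     if person == None:
--         for name, identifier in names_ids:
--             if name.upper() in matched_txt:
--                 person = identifier
--
--     # Only match last name if full name is not found
--     if person == None:
--         for name, identifier in names_ids:
--             last_name = " " + name.split()[-1]
--             if last_name in matched_txt:
--                 person = identifier
--             elif last_name.upper() in matched_txt:
--                 person = identifier
--     return person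
-- ===== SOURCE B (Python) =====
-- def _detect_mp(matched_txt, names_ids):
--     # Single pass with a ranking accumulator: every name gets a key (tier, -position)
--     # -- tier 0 = full name in text, 1 = uppercased full name, 2 = " "+last name
--     # (plain or uppercased); the candidate with the smallest key wins, which is
--     # the last-listed match of the best tier.
--     best = None
--     for idx, (name, identifier) in enumerate(names_ids):
--         if name in matched_txt:
--             tier = 0
--         elif name.upper() in matched_txt:
--             tier = 1
--         else:
--             parts = name.split()
--             if not parts:
--                 continue
--             last_name = " " + parts[-1]
--             if last_name in matched_txt or last_name.upper() in matched_txt: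
--                 tier = 2
--             else:
--                 continue
--         key = (tier, -idx)
--         if best is None or key < best[0]:
--             best = (key, identifier)
--     return best[1] if best is not None else None
-- ===== Notes on version B (the rewrite author's own statement) =====
-- stated objective: alternative
-- what changed: B replaces A's three staged forward passes (each overwriting a result variable) by a single pass that assigns every name a key (tier, -position) and keeps the minimum-key candidate, so tier priority and last-match tie-breaking come from the key order instead of pass sequencing.
import Mathlib
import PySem

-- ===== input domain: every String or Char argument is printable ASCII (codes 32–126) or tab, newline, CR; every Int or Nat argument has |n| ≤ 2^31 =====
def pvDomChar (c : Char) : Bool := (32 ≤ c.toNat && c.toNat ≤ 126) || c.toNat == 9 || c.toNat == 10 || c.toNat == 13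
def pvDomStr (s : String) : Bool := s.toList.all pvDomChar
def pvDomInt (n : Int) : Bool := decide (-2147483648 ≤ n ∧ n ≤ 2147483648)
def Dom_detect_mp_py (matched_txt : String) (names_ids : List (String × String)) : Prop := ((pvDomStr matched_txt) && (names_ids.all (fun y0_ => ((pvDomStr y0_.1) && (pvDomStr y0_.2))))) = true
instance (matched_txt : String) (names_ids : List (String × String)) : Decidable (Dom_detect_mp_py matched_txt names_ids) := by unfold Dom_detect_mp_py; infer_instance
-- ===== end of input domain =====

-- B replaces A's three staged overwrite passes by ONE pass that ranks every name with a
-- key (tier, -position) and keeps the minimum; return values agree wherever A returns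
-- (A raises IndexError where Pre_ fails).

-- " " + name.split()[-1] as one total expression (getD "" is only reached where Python raises,
-- i.e. outside Pre_detect_mp_py)
def pvLastName (name : String) : String :=
  String.ofList (' ' :: ((PySem.List.pyGet? (PySem.Str.split₀ name) (-1)).getD "").toList)

-- ===== PORT A =====
def detect_mp_py (matched_txt : String) (names_ids : List (String × String)) : Option String :=
  let person : Option String :=
    names_ids.foldl (fun person p =>
      if PySem.Str.isIn p.1 matched_txt then some p.2 else person) none
  let person : Option String :=
    if person = none then
      names_ids.foldl (fun person p =>
        if PySem.Str.isIn (PySem.Str.upper p.1) matched_txt then some p.2 else person) none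
    else person
  if person = none then
    names_ids.foldl (fun person p =>
      let last_name := pvLastName p.1
      if PySem.Str.isIn last_name matched_txt then some p.2
      else if PySem.Str.isIn (PySem.Str.upper last_name) matched_txt then some p.2
      else person) none
  else person

-- ===== PORT B =====
-- tier of a name: 0 = full name in text, 1 = uppercased full name, 2 = " "+last name
-- (plain or uppercased), none = no match / empty split (Python's `continue`)
def pvTier (matched_txt name : String) : Option Nat :=
  if PySem.Str.isIn name matched_txt then some 0
  else if PySem.Str.isIn (PySem.Str.upper name) matched_txt then some 1
  else
    match PySem.List.pyGet? (PySem.Str.split₀ name) (-1) with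
    | none => none
    | some last =>
      let last_name := String.ofList (' ' :: last.toList)
      if PySem.Str.isIn last_name matched_txt || PySem.Str.isIn (PySem.Str.upper last_name) matched_txt
      then some 2 else none

-- Python tuple comparison (t, -idx) < (t', -idx')
def pvKeyLt (a b : Nat × Int) : Bool := a.1 < b.1 || (a.1 == b.1 && a.2 < b.2)

def pvStep (matched_txt : String) (best : Option ((Nat × Int) × String))
    (e : Int × (String × String)) : Option ((Nat × Int) × String) :=
  match pvTier matched_txt e.2.1 with
  | none => best
  | some t =>
    let key : Nat × Int := (t, -e.1)
    match best with
    | none => some (key, e.2.2)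
    | some b => if pvKeyLt key b.1 then some (key, e.2.2) else best

def detect_mp_py_alt (matched_txt : String) (names_ids : List (String × String)) : Option String :=
  match (PySem.List.enumerate names_ids).foldl (pvStep matched_txt) none with
  | some b => some b.2
  | none => none

-- ===== PRECONDITION & SPEC =====
-- Pre_ excludes exactly the inputs where Python A raises IndexError: no name matches in the
-- first two tiers (so the third loop runs) and some name is empty/whitespace-only (split() = []).
def Pre_detect_mp_py (matched_txt : String) (names_ids : List (String × String)) : Prop :=
  (∃ p ∈ names_ids, PySem.Str.isIn p.1 matched_txt = true ∨ PySem.Str.isIn (PySem.Str.upper p.1) matched_txt = true)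
  ∨ (∀ p ∈ names_ids, PySem.Str.split₀ p.1 ≠ [])
instance (matched_txt : String) (names_ids : List (String × String)) : Decidable (Pre_detect_mp_py matched_txt names_ids) := by unfold Pre_detect_mp_py; infer_instance

def pvWitness_detect_mp_py : String × (List (String × String)) :=
  ("hello Anna Bo", [("Anna", "a1"), ("Bo", "b1")])

def Spec_detect_mp_py (matched_txt : String) (names_ids : List (String × String)) (out : Option String) : Prop := out = detect_mp_py_alt matched_txt names_ids
instance (matched_txt : String) (names_ids : List (String × String)) (out : Option String) : Decidable (Spec_detect_mp_py matched_txt names_ids out) := by unfold Spec_detect_mp_py; infer_instance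

-- ===== CLAIM (what is proved, stated in full; the proofs are below) =====
def Claim_equal_detect_mp_py : Prop := ∀ (matched_txt : String) (names_ids : List (String × String)), Dom_detect_mp_py matched_txt names_ids → Pre_detect_mp_py matched_txt names_ids → Spec_detect_mp_py matched_txt names_ids (detect_mp_py matched_txt names_ids)

-- ===== LEMMAS AND PROOFS =====

-- A forward pass that overwrites the accumulator on every match returns the LAST match,
-- i.e. the FIRST match of the reversed list.
theorem foldl_overwrite_eq_reverse_find {α β : Type} (q : α → Bool) (f : α → β)
    (l : List α) (init : Option β) :
    l.foldl (fun acc x => if q x then some (f x) else acc) init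
      = (match l.reverse.find? q with
         | some x => some (f x)
         | none => init) := by
  induction l generalizing init with
  | nil => simp
  | cons a t ih =>
    simp only [List.foldl_cons, List.reverse_cons, List.find?_append]
    rw [ih]
    cases h : t.reverse.find? q with
    | some x => simp
    | none =>
      by_cases hq : q a <;> simp [hq, List.find?]

-- A's nested if/elif step in the third loop equals a single-||-condition step.
theorem tier3_step_eq (matched_txt : String) :
    (fun (person : Option String) (p : String × String) =>
      if PySem.Str.isIn (pvLastName p.1) matched_txt then some p.2
      else if PySem.Str.isIn (PySem.Str.upper (pvLastName p.1)) matched_txt then some p.2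
      else person)
    = (fun (person : Option String) (p : String × String) =>
      if (PySem.Str.isIn (pvLastName p.1) matched_txt
          || PySem.Str.isIn (PySem.Str.upper (pvLastName p.1)) matched_txt) then some p.2
      else person) := by
  funext person p
  cases h1 : PySem.Str.isIn (pvLastName p.1) matched_txt <;>
    cases h2 : PySem.Str.isIn (PySem.Str.upper (pvLastName p.1)) matched_txt <;>
    simp

-- the closed form B's fold computes: first tier-0 match of the reversed enumerated list,
-- else tier 1, else tier 2, with its key
def pvPick (txt : String) (E : List (Int × (String × String))) : Option ((Nat × Int) × String) :=
  match E.reverse.find? (fun e => pvTier txt e.2.1 == some 0) with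
  | some e => some ((0, -e.1), e.2.2)
  | none =>
    match E.reverse.find? (fun e => pvTier txt e.2.1 == some 1) with
    | some e => some ((1, -e.1), e.2.2)
    | none =>
      match E.reverse.find? (fun e => pvTier txt e.2.1 == some 2) with
      | some e => some ((2, -e.1), e.2.2)
      | none => none

theorem find?_eq_of_mem_eq {α : Type} (p q : α → Bool) (l : List α)
    (h : ∀ x ∈ l, p x = q x) : l.find? p = l.find? q := by
  induction l with
  | nil => rfl
  | cons a t ih =>
    simp only [List.find?, h a (by simp)]
    cases q a
    · exact ih fun x hx => h x (by simp [hx])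
    · rfl

theorem pvPick_idx (txt : String) (E : List (Int × (String × String))) (b : (Nat × Int) × String)
    (h : pvPick txt E = some b) : ∃ e ∈ E, b.1.2 = -e.1 := by
  unfold pvPick at h
  rcases h0 : E.reverse.find? (fun e => pvTier txt e.2.1 == some 0) with _ | e0
  · rcases h1 : E.reverse.find? (fun e => pvTier txt e.2.1 == some 1) with _ | e1
    · rcases h2 : E.reverse.find? (fun e => pvTier txt e.2.1 == some 2) with _ | e2
      · simp [h0, h1, h2] at h
      · refine ⟨e2, List.mem_reverse.mp (List.mem_of_find?_eq_some h2), ?_⟩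
        simp [h0, h1, h2] at h
        rw [← h]
    · refine ⟨e1, List.mem_reverse.mp (List.mem_of_find?_eq_some h1), ?_⟩
      simp [h0, h1] at h
      rw [← h]
  · refine ⟨e0, List.mem_reverse.mp (List.mem_of_find?_eq_some h0), ?_⟩
    simp [h0] at h
    rw [← h]

theorem pvGetLast (l : List String) (h : l ≠ []) :
    ∃ y, PySem.List.pyGet? l (-1) = some y := by
  have hl : 1 ≤ l.length := List.length_pos_iff.mpr h
  simp [PySem.List.pyGet?, PySem.List.pyIdx?, hl]
  exact ⟨l[l.length - 1], List.getElem?_eq_getElem (by omega)⟩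

theorem pvTier_le_two (txt n : String) (t : Nat) (h : pvTier txt n = some t) : t ≤ 2 := by
  unfold pvTier at h
  split_ifs at h with h1 h2
  · simp at h; omega
  · simp at h; omega
  · rcases hg : PySem.List.pyGet? (PySem.Str.split₀ n) (-1) with _ | last <;> rw [hg] at h
    · simp at h
    · simp at h
      obtain ⟨-, h2⟩ := h
      omega

theorem tier0_eq (txt n : String) :
    (pvTier txt n == some 0) = PySem.Str.isIn n txt := by
  rcases hg : PySem.List.pyGet? (PySem.Str.split₀ n) (-1) with _ | last <;>
  cases hI : PySem.Chars.isIn n.toList txt.toList <;>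
  simp [pvTier, hg, hI] <;>
  split_ifs <;> simp

theorem tier1_eq (txt n : String) (h : PySem.Str.isIn n txt = false) :
    (pvTier txt n == some 1) = PySem.Str.isIn (PySem.Str.upper n) txt := by
  have hI : PySem.Chars.isIn n.toList txt.toList = false := by simpa using h
  rcases hg : PySem.List.pyGet? (PySem.Str.split₀ n) (-1) with _ | last <;>
  cases hU : PySem.Chars.isIn (PySem.Chars.upper n.toList) txt.toList <;>
  simp [pvTier, hg, hI, hU]

theorem tier2_eq (txt n : String) (h1 : PySem.Str.isIn n txt = false)
    (h2 : PySem.Str.isIn (PySem.Str.upper n) txt = false)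
    (h3 : PySem.Str.split₀ n ≠ []) :
    (pvTier txt n == some 2)
      = (PySem.Str.isIn (pvLastName n) txt || PySem.Str.isIn (PySem.Str.upper (pvLastName n)) txt) := by
  obtain ⟨last, hg⟩ := pvGetLast _ h3
  have hI : PySem.Chars.isIn n.toList txt.toList = false := by simpa using h1
  have hU : PySem.Chars.isIn (PySem.Chars.upper n.toList) txt.toList = false := by simpa using h2
  have hln : pvLastName n = String.ofList (' ' :: last.toList) := by
    simp [pvLastName, hg]
  rw [hln]
  cases hA : PySem.Chars.isIn (' ' :: last.toList) txt.toList <;>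
  cases hB : PySem.Chars.isIn (PySem.Chars.upper (' ' :: last.toList)) txt.toList <;>
  simp [pvTier, hg, hI, hU, hA, hB]

theorem pvStep_pick (txt : String) (E : List (Int × (String × String))) (L : Int)
    (x : String × String) (HL : ∀ e ∈ E, e.1 < L) :
    pvStep txt (pvPick txt E) (L, x) = pvPick txt (E ++ [(L, x)]) := by
  have hrev : (E ++ [(L, x)]).reverse = (L, x) :: E.reverse := by simp
  rcases ht : pvTier txt x.1 with _ | t
  · -- no tier: element is skipped on both sides
    simp only [pvStep, ht]
    unfold pvPick
    rw [hrev, List.find?_cons_of_neg (by simp [ht]), List.find?_cons_of_neg (by simp [ht]),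
        List.find?_cons_of_neg (by simp [ht])]
  · have ht2 := pvTier_le_two txt x.1 t ht
    interval_cases t
    · -- tier 0: new element always wins
      have hR : pvPick txt (E ++ [(L, x)]) = some ((0, -L), x.2) := by
        unfold pvPick
        rw [hrev, List.find?_cons_of_pos (by simp [ht])]
      rw [hR]
      rcases hb : pvPick txt E with _ | b
      · simp [pvStep, ht]
      · obtain ⟨e, heE, hidx⟩ := pvPick_idx txt E b hb
        have hlt : pvKeyLt (0, -L) b.1 = true := by
          have := HL e heE
          rcases b with ⟨⟨tb, ib⟩, idb⟩
          simp at hidx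
          simp [pvKeyLt]
          omega
        simp [pvStep, ht, hlt]
    · -- tier 1
      rcases h0 : E.reverse.find? (fun e => pvTier txt e.2.1 == some 0) with _ | e0
      · have hR : pvPick txt (E ++ [(L, x)]) = some ((1, -L), x.2) := by
          unfold pvPick
          rw [hrev, List.find?_cons_of_neg (by simp [ht]), h0,
              List.find?_cons_of_pos (by simp [ht])]
        rw [hR]
        rcases h1 : E.reverse.find? (fun e => pvTier txt e.2.1 == some 1) with _ | e1
        · rcases h2 : E.reverse.find? (fun e => pvTier txt e.2.1 == some 2) with _ | e2
          · simp [pvStep, ht, pvPick, h0, h1, h2]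
          · have he2 : e2.1 < L := HL e2 (List.mem_reverse.mp (List.mem_of_find?_eq_some h2))
            have hlt : pvKeyLt (1, -L) (2, -e2.1) = true := by simp [pvKeyLt]
            simp [pvStep, ht, pvPick, h0, h1, h2, hlt]
        · have he1 : e1.1 < L := HL e1 (List.mem_reverse.mp (List.mem_of_find?_eq_some h1))
          have hlt : pvKeyLt (1, -L) (1, -e1.1) = true := by simp [pvKeyLt]; omega
          simp [pvStep, ht, pvPick, h0, h1, hlt]
      · -- a tier-0 element exists: kept
        have hlt : pvKeyLt (1, -L) (0, -e0.1) = false := by simp [pvKeyLt]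
        have hR : pvPick txt (E ++ [(L, x)]) = some ((0, -e0.1), e0.2.2) := by
          unfold pvPick
          rw [hrev, List.find?_cons_of_neg (by simp [ht]), h0]
        rw [hR]
        simp [pvStep, ht, pvPick, h0, hlt]
    · -- tier 2
      rcases h0 : E.reverse.find? (fun e => pvTier txt e.2.1 == some 0) with _ | e0
      · rcases h1 : E.reverse.find? (fun e => pvTier txt e.2.1 == some 1) with _ | e1
        · have hR : pvPick txt (E ++ [(L, x)]) = some ((2, -L), x.2) := by
            unfold pvPick
            rw [hrev, List.find?_cons_of_neg (by simp [ht]), h0,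
                List.find?_cons_of_neg (by simp [ht]), h1,
                List.find?_cons_of_pos (by simp [ht])]
          rw [hR]
          rcases h2 : E.reverse.find? (fun e => pvTier txt e.2.1 == some 2) with _ | e2
          · simp [pvStep, ht, pvPick, h0, h1, h2]
          · have he2 : e2.1 < L := HL e2 (List.mem_reverse.mp (List.mem_of_find?_eq_some h2))
            have hlt : pvKeyLt (2, -L) (2, -e2.1) = true := by simp [pvKeyLt]; omega
            simp [pvStep, ht, pvPick, h0, h1, h2, hlt]
        · have hlt : pvKeyLt (2, -L) (1, -e1.1) = false := by simp [pvKeyLt]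
          have hR : pvPick txt (E ++ [(L, x)]) = some ((1, -e1.1), e1.2.2) := by
            unfold pvPick
            rw [hrev, List.find?_cons_of_neg (by simp [ht]), h0,
                List.find?_cons_of_neg (by simp [ht]), h1]
          rw [hR]
          simp [pvStep, ht, pvPick, h0, h1, hlt]
      · have hlt : pvKeyLt (2, -L) (0, -e0.1) = false := by simp [pvKeyLt]
        have hR : pvPick txt (E ++ [(L, x)]) = some ((0, -e0.1), e0.2.2) := by
          unfold pvPick
          rw [hrev, List.find?_cons_of_neg (by simp [ht]), h0]
        rw [hR]
        simp [pvStep, ht, pvPick, h0, hlt]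

theorem fold_eq_pick (txt : String) (ns : List (String × String)) :
    (PySem.List.enumerate ns).foldl (pvStep txt) none = pvPick txt (PySem.List.enumerate ns) := by
  induction ns using List.reverseRecOn with
  | nil => rfl
  | append_singleton ms x ih =>
    rw [PySem.List.enumerate_append]
    have hone : PySem.List.enumerate [x] ((0 : Int) + ms.length) = [((ms.length : Int), x)] := by
      simp [PySem.List.enumerate_cons, PySem.List.enumerate_nil]
    rw [hone, List.foldl_append, List.foldl_cons, List.foldl_nil, ih]
    refine pvStep_pick txt _ _ x (fun e he => ?_)
    have h1 : e.1 ∈ (PySem.List.enumerate ms).map (·.1) := List.mem_map_of_mem he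
    rw [PySem.List.map_fst_enumerate] at h1
    have h2 := (PySem.List.mem_pyRange_one).mp h1
    omega

-- ===== VERDICT (by name: the statement is the Claim_ definition above) =====
theorem detect_mp_py_spec : Claim_equal_detect_mp_py := by
  intro txt ns _dom pre
  unfold Spec_detect_mp_py
  simp only [detect_mp_py, detect_mp_py_alt]
  rw [fold_eq_pick,
      foldl_overwrite_eq_reverse_find (fun p : String × String => PySem.Str.isIn p.1 txt) (fun p : String × String => p.2) ns none,
      foldl_overwrite_eq_reverse_find (fun p : String × String => PySem.Str.isIn (PySem.Str.upper p.1) txt) (fun p : String × String => p.2) ns none,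
      tier3_step_eq txt,
      foldl_overwrite_eq_reverse_find
        (fun p : String × String => PySem.Str.isIn (pvLastName p.1) txt
          || PySem.Str.isIn (PySem.Str.upper (pvLastName p.1)) txt) (fun p : String × String => p.2) ns none]
  have hmapsnd : (PySem.List.enumerate ns).map (·.2) = ns := PySem.List.map_snd_enumerate ns 0
  have hnsrev : ns.reverse = (PySem.List.enumerate ns).reverse.map (·.2) := by
    rw [List.map_reverse, hmapsnd]
  have hmem : ∀ p ∈ ns, ∃ e ∈ (PySem.List.enumerate ns).reverse, e.2 = p := by
    intro p hp
    rw [← hmapsnd] at hp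
    obtain ⟨e, he, hep⟩ := List.mem_map.mp hp
    exact ⟨e, List.mem_reverse.mpr he, hep⟩
  rw [hnsrev,
      List.find?_map, List.find?_map, List.find?_map]
  have hq0 : ((fun p : String × String => PySem.Str.isIn p.1 txt) ∘ (·.2))
      = (fun e : Int × (String × String) => pvTier txt e.2.1 == some 0) := by
    funext e; exact (tier0_eq txt e.2.1).symm
  rw [hq0]
  unfold pvPick
  rcases h0 : (PySem.List.enumerate ns).reverse.find? (fun e => pvTier txt e.2.1 == some 0) with _ | e0
  · rw [h0]
    simp only [Option.map_none]
    have hno0 : ∀ e ∈ (PySem.List.enumerate ns).reverse, PySem.Str.isIn e.2.1 txt = false := by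
      intro e he
      have := List.find?_eq_none.mp h0 e he
      rw [← tier0_eq txt e.2.1]
      simpa using this
    have hq1 : (PySem.List.enumerate ns).reverse.find?
          ((fun p : String × String => PySem.Str.isIn (PySem.Str.upper p.1) txt) ∘ (·.2))
        = (PySem.List.enumerate ns).reverse.find? (fun e => pvTier txt e.2.1 == some 1) := by
      refine find?_eq_of_mem_eq _ _ _ (fun e he => ?_)
      exact (tier1_eq txt e.2.1 (hno0 e he)).symm
    rw [hq1]
    rcases h1 : (PySem.List.enumerate ns).reverse.find? (fun e => pvTier txt e.2.1 == some 1) with _ | e1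
    · rw [h1]
      simp only [Option.map_none]
      have hno1 : ∀ e ∈ (PySem.List.enumerate ns).reverse,
          PySem.Str.isIn (PySem.Str.upper e.2.1) txt = false := by
        intro e he
        have := List.find?_eq_none.mp h1 e he
        rw [← tier1_eq txt e.2.1 (hno0 e he)]
        simpa using this
      have hsplit : ∀ p ∈ ns, PySem.Str.split₀ p.1 ≠ [] := by
        rcases pre with ⟨p, hp, hcase⟩ | hs
        · exfalso
          obtain ⟨e, he, hep⟩ := hmem p hp
          rcases hcase with hc | hc
          · rw [← hep] at hc; rw [hno0 e he] at hc; exact Bool.false_ne_true hc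
          · rw [← hep] at hc; rw [hno1 e he] at hc; exact Bool.false_ne_true hc
        · exact hs
      have hq2 : (PySem.List.enumerate ns).reverse.find?
            ((fun p : String × String => PySem.Str.isIn (pvLastName p.1) txt
              || PySem.Str.isIn (PySem.Str.upper (pvLastName p.1)) txt) ∘ (·.2))
          = (PySem.List.enumerate ns).reverse.find? (fun e => pvTier txt e.2.1 == some 2) := by
        refine find?_eq_of_mem_eq _ _ _ (fun e he => ?_)
        have hsp : PySem.Str.split₀ e.2.1 ≠ [] := by
          refine hsplit e.2 ?_
          have : e.2 ∈ ((PySem.List.enumerate ns).reverse.map (·.2)) := List.mem_map_of_mem he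
          rw [← hnsrev] at this
          exact List.mem_reverse.mp this
        exact (tier2_eq txt e.2.1 (hno0 e he) (hno1 e he) hsp).symm
      rw [hq2]
      rcases h2 : (PySem.List.enumerate ns).reverse.find? (fun e => pvTier txt e.2.1 == some 2) with _ | e2
      · simp [h2]
      · simp [h2]
    · simp [h1]
  · simp [h0]
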